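/- GENERATED by tools/from_farm_form.py from farm/worked/__asan_store16_noabort/Proof.lean (a worked proof of the farm's unit `__asan_store16_noabort`,
   accepted by the verdict) — do not edit. -/
import Asan.CheckWalk
import ProgX.Base.Spec.Units.asan_store16_noabort

open X86 X86.User Asan ProgX.Base

set_option maxRecDepth 4000
set_option maxHeartbeats 4000000

namespace ProgX.Base.Spec.Proved.asan_store16_noabort
open ProgX.Base.Spec.asan_store16_noabort (Statement)

/-- The contract `s` of a callee, REMEMBERING a fact `R` about the state at its entry. The walker's call rule forgets what it knew
of the registers of the state at the callee's entry (only its memory fact `w_mem_<addr>` stays), while a postcondition such as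
`rangeBadSpec.post` speaks of that state's `rdi` and `rsi`, and `Keeps` relates the returned registers to that state's. `R` is asked
for with the precondition (where the walker still knows the registers) and handed back with the postcondition. -/
def remembering_w (s : Spec) (R : State → Prop) : Spec where
  pre u := s.pre u ∧ R u
  post u v := s.post u v ∧ R u
  frame := s.frame
  writes := s.writes

/-- The frame of a remembering_w contract is the contract's (a rewrite rule for the `call_room` side goal). -/
theorem remembering_frame_w (s : Spec) (R : State → Prop) : (remembering_w s R).frame = s.frame := id rfl

/-- The footprint of a remembering_w contract is the contract's. -/
theorem remembering_footprint_w (s : Spec) (R : State → Prop) (u : State) :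
    (remembering_w s R).footprint u = s.footprint u := id rfl

/-- A contract gives the remembering_w contract, for every `R` (`Calls.weaken`). -/
theorem calls_remembering_w {Lay : Layout} {μ : Microarch} {I : State → Prop} {K : Conv} {entry : Word} {s : Spec}
    (h : Calls Lay μ I K entry s) (R : State → Prop) : Calls Lay μ I K entry (remembering_w s R) := by
  refine h.weaken ?_ ?_ (Nat.le_refl _) ?_
  · -- the precondition
    intro u hp
    exact hp.1
  · -- the postcondition
    intro u v hp hpost
    exact ⟨hpost, hp.2⟩
  · -- the windows are the same
    intro u _ w hw a h1 h2
    refine ⟨w, ?_, h1, h2⟩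
    rw [remembering_footprint_w]
    unfold Spec.footprint
    exact List.mem_cons_of_mem _ hw

/-- What this function remembers across its call of `range_bad`: the registers are the caller's `u` but for rsi (= 16), rbx and rsp;
the vector registers and MXCSR are `u`'s. -/
def AtCall_w (u v : State) : Prop :=
  RegsKept [.rsi, .rbx, .rsp] u v ∧ v.reg .rsi = 16 ∧ v.zmm = u.zmm ∧ v.mxcsr = u.mxcsr

end ProgX.Base.Spec.Proved.asan_store16_noabort

open ProgX.Base.Spec.asan_store16_noabort ProgX.Base.Spec.Proved.asan_store16_noabort

/-- `__asan_store16_noabort(a)` satisfies its contract `check16Spec`: `push rbx`, `range_bad(a, 16)` (its contract, remembering_w the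
registers at its entry), which returns 0 because the 16 bytes are accessible (the two pushes did not touch the shadow), so the
`jne` into `__asan_report` is not taken; `pop rbx`, `ret`. -/
theorem ProgX.Base.Spec.Proved.asan_store16_noabort_ok : ProgX.Base.Spec.asan_store16_noabort.Statement := by
  intro Lay hLay μ hμ u₀ hcode h_range_bad u ret he hpre
  v_entry he
  have hrb := calls_remembering_w h_range_bad (AtCall_w u)
  clear h_range_bad
  -- (a fact about the vector registers, so that the walk tracks them)
  have hzmm : u.zmm = u.zmm := rfl
  -- 0x100a80 … 0x100a89: push rbx ; mov rbx, rdi ; mov esi, 16 ; call range_bad       asan_rt.c:99-100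
  u_walk hcode [hμ.vendor] span [ProgX.Base.L.textLo, ProgX.Base.L.textHi] side (v_side)
  · -- call_room
    rw [remembering_frame_w]
    v_side
  · v_inv
  · -- the precondition of `range_bad` (1 ≤ 16), and what is remembered
    refine ⟨?_, w_kept, w_rsi, w_zmm, w_mxcsr⟩
    show 1 ≤ (s_100a89.reg .rsi).toNat
    rw [w_rsi]
    decide
  · -- 0x100a8e (cut1 = ret1): after the call                                         asan_rt.c:100
    obtain ⟨⟨hmem, hkeeps, hle, hiff⟩, hk, hrsi, hz, hmxc⟩ := w_post
    obtain ⟨hkN, hzN, hmxN⟩ := hkeeps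
    -- the memory, the code span, DF and MXCSR of the returned state
    have w_mem := hmem.trans w_mem_100a89
    have w_eq : Mem.EqOn ProgX.Base.L.textLo ProgX.Base.L.textHi u₀.mem s_100a89r.mem := ProgX.Base.conv_code_eqOn w_code
    have hdf : s_100a89r.flags .df = false := (show abiInv _ from w_inv).1
    have w_mxcsr : s_100a89r.mxcsr = u.mxcsr := hmxN.trans hmxc
    have w_zmm : s_100a89r.zmm = u.zmm := hzN.trans hz
    -- the registers: `range_bad` kept all but rax rdx rdi (rsp), the three instructions before it all but rsi rbx (rsp)
    have hk2 : RegsKept [.rax, .rdx, .rsi, .rdi, .rbx, .rsp] u s_100a89r :=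
      (hk.mono_all (by rfl)).trans (hkN.mono_all (by rfl))
    replace w_kept := hk2
    -- the range is accessible (the two pushes did not touch the shadow): `range_bad` returned 0
    have hun : ShadowUntouched u.mem s_100a89.mem := by
      rw [w_mem_100a89]
      v_untouched
    have hacc : Accessible s_100a89.mem (s_100a89.reg .rdi).toNat (s_100a89.reg .rsi).toNat := by
      rw [hk.get .rdi (by rfl), hrsi]
      exact Accessible.eqOn hpre (by decide) hun
    have hrax0 : (s_100a89r.reg .rax).toNat = 0 := hiff.mpr hacc
    have w_rax : s_100a89r.reg .rax = 0 := UInt64.toNat_inj.mp hrax0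
    clear hiff hacc hrax0 hle hmem hkN hk hk2
    -- 0x100a8e … 0x100a93: test eax, eax ; jne (not taken) ; pop rbx ; ret               asan_rt.c:100-103
    u_walk hcode [hμ.vendor] span [ProgX.Base.L.textLo, ProgX.Base.L.textHi] side (v_side)
    · -- 0x100aa1, the path into `__asan_report`: infeasible, eax = 0
      exfalso
      exact hbr_100a90 (by decide)
    · -- the state after the `ret`: the contract's `Returned`
      refine ReachVia.done ?_
      v_returned
      -- the post: rbx was popped back, the vector registers and MXCSR were never written
      refine ⟨?_, w_zmm, w_mxcsr⟩
      unfold clob16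
      u_saved
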